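/- GENERATED by mk_final_copies.py from the proof of the farm's unit `codebook_decode_deinterleave_repeat.5` (farm:codebook_decode_deinterleave_repeat.5.2: Proof.lean) as the
   re-elaboration sweep compiled it — do not edit. -/
import Asan.CheckWalk
import Vorbis.Spec.Units.codebook_decode_deinterleave_repeat_5

namespace Vorbis.Spec.codebook_decode_deinterleave_repeat_5
open X86 X86.User Asan Vorbis Vorbis.Spec Vorbis.Spec.Deint

/-- **The 32-bit subtraction `total_decode -= effective` does not wrap** (0x10de04, C line 1955): the dword `t` in the argument
slot is a positive `int`, `effective ≤ 65535`; the value the walker stores (`BitVec.ofNat 32 t - r15d`), read back as a signed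
dword, is `total_decode − effective`. -/
theorem sub_eff (t eff : Nat) (ht : t < 2 ^ 32) (heff : eff ≤ 65535) (hpos : 1 ≤ sint32 t) :
    sint32 ((BitVec.ofNat 32 t - Word.part .w32 (UInt64.ofNat eff)).toNat % 256 ^ 4) = sint32 t - (eff : Int) := by
  have e1 : (UInt64.ofNat eff).toNat = eff := X86.User.toNat_ofNat_lt' eff (by omega)
  rw [BitVec.toNat_sub, BitVec.toNat_ofNat, Vorbis.toNat_part32, e1]
  rcases sint32_cases t with ⟨c1, c2⟩ | ⟨c1, c2⟩
  · rcases sint32_cases ((2 ^ 32 - eff % 2 ^ 32 + t % 2 ^ 32) % 2 ^ 32 % 256 ^ 4) with ⟨d1, d2⟩ | ⟨d1, d2⟩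
    · omega
    · omega
  · omega

end Vorbis.Spec.codebook_decode_deinterleave_repeat_5


open X86 X86.User Asan Vorbis Vorbis.Spec Vorbis.Spec.Deint

set_option maxRecDepth 4000
set_option maxHeartbeats 4000000

/-- Segment 5 of `codebook_decode_deinterleave_repeat` (`cut8` = 10DE04H … `cut9` = 10DE09H, ONE instruction: `sub DWORD PTR
[rsp+78H], r15d`, C line 1955 `total_decode -= effective`): from `AtJoin ci pi eff td` to `AtHead ci pi eff (td − eff)`. The store
goes IN PLACE into the second argument slot `[e.rsp + 16, e.rsp + 20)`: a window of the contract's footprint (`Mid.same`), clean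
stack by `DeintPre.args` (the shadow layer with `top = e.rsp + 24`), so every object the assertion reads — `*f`, the struct at `c`
and its `sorted_values` block, the table `outputs`, the two ints — lies off it (`LiveIn.where_`, `blk_where`, `site_where`), and
the frame slots are below the return address. The new slot value is `sub_eff`. -/
theorem Vorbis.Spec.Worked.codebook_decode_deinterleave_repeat_5_ok : Vorbis.Spec.codebook_decode_deinterleave_repeat_5.Statement := by
  intro Lay hLay μ hμ u₀ hcode others frames Blk len ret e u ci pi eff td hat
  obtain ⟨hrip, hcommon, hlocals, hdinv, htd⟩ := hat
  obtain ⟨hmid, hpre, hreader, hcb, hapart, hbook, htype2, hc, hchSlot, houtsSlot, hfSlot, hcpSlot, hppSlot, hlenSlot,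
    htable, hcInt, hpInt⟩ := hcommon
  obtain ⟨hciReg, hpiSlot, heffReg, htdSlot⟩ := hlocals
  obtain ⟨he, hrsp, hra, h15, h14, h13, h12, hbp, hbx, hsame, hcodeok, hinv, hun⟩ := hmid
  have he0 := he
  v_entry he
  have hdf := hinv.1
  have hmx := hinv.2
  have hsse := Vorbis.sseOK_of_abiInv hinv
  have hspan : Mem.EqOn Vorbis.L.textLo Vorbis.L.textHi u₀.mem u.mem := hcodeok
  -- WHERE THE ARGUMENT SLOT IS: clean stack between the return address and the caller's frame (`DeintPre.args`)
  have hargs := hpre.args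
  have hoffT := hpre.book.reader.shadow.offText
  have hhi := hargs.stack.hi
  have htop : 0x700000 < (e.reg .rsp).toNat + 24 := by omega
  have hBL := hpre.book.reader.env.live
  -- … and where everything the assertion reads is: off that slot
  have wF := hpre.book.reader.env.obj.where_ hargs hoffT (by decide)
  simp only [Vorbis.Off.sizeof.stb_vorbis] at wF
  have wCp := site_where hargs hoffT htop hpre.cpSite
  have wPp := site_where hargs hoffT htop hpre.ppSite
  have wTab := site_where hargs hoffT htop hpre.table
  obtain ⟨B, hB, hin⟩ := hpre.book.book
  simp only [vblock, Vorbis.Off.sizeof.Codebook] at hin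
  have wB := blk_where hBL hargs hoffT htop hB (by omega)
  have hTH : Vorbis.L.textHi = 0x119d40 := rfl
  -- the dword the instruction loads, and the effective's bound (K1: dimensions ≤ 65535)
  obtain ⟨t, ht⟩ : ∃ t, u.mem.readLE (e.reg .rsp + 16) 4 = t := ⟨_, rfl⟩
  have ht32 : t < 2 ^ 32 := by
    rw [← ht]
    exact Mem.readLE_lt' _ _ 4
  have heff : eff ≤ 65535 := by
    have h1 := hdinv.eff_le
    have h2 := hcb.K1.dim_le
    rw [hbook.dimensions] at h2
    unfold dimOf at h1
    omega
  -- 10DE04H `sub DWORD PTR [rsp+78H], r15d` (C line 1955: total_decode -= effective)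
  u_walk hcode [hμ.vendor] until [Vorbis.L.codebook_decode_deinterleave_repeat.cut9] span [Vorbis.L.textLo, Vorbis.L.textHi] side (v_side)
  -- 10DE09H: the head of `while (total_decode > 0)`
  have hst : Mem.SameExcept [⟨(e.reg .rsp).toNat + 16, (e.reg .rsp).toNat + 20⟩] u.mem s_10de04.mem := by
    u_same
  have hun' : ShadowUntouched u.mem s_10de04.mem := by v_untouched
  -- the struct at `c` and its `sorted_values` block are kept: allocated blocks, off the stack below the caller's frame
  have hkeptC : (Codebook.block (cOf e)).Kept u.mem s_10de04.mem := by
    refine Block.Kept.of_sameExcept hst ?_ (Codebook.block_no_wrap hpre.book.ok hB (by simp only [vblock, Vorbis.Off.sizeof.Codebook]; exact hin))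
    intro w hw
    have e1 : w = ⟨(e.reg .rsp).toNat + 16, (e.reg .rsp).toNat + 20⟩ := List.mem_singleton.mp hw
    subst e1
    simp only [Vorbis.Off.sizeof.Codebook, cOf]
    omega
  have hsf : Codebook.SameFields u.mem s_10de04.mem (cOf e) := Codebook.SameFields.of_kept hkeptC
  have hcb' : CodebookOK Blk s_10de04.mem (cOf e) := by
    apply hcb.frame hkeptC
    intro hse
    have hsv := hcb.K4.sv hse
    have wSv := blk_where hBL hargs hoffT htop hsv (by simp only []; omega)
    refine Block.Kept.of_sameExcept hst ?_ (hpre.book.ok.no_wrap hsv)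
    intro w hw
    have e1 : w = ⟨(e.reg .rsp).toNat + 16, (e.reg .rsp).toNat + 20⟩ := List.mem_singleton.mp hw
    subst e1
    simp only [] at wSv ⊢
    omega
  -- `Bits f`, μ: the store is off `*f`
  have hreader' : ReaderPost Blk len e.mem s_10de04.mem (fOf e) := by
    rw [w_mem]
    refine hreader.trans (Vorbis.Spec.Reader.store_off_obj hreader.bits _ 4 _ (by u_omega) ?_).1
    unfold fOf
    u_omega
  have hmid' : Mid u₀ (codebook_decode_deinterleave_repeat.spec others frames Blk len)
      L.codebook_decode_deinterleave_repeat.entry ret e (e.reg .rsp - 104) s_10de04 := by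
    refine ⟨he0, ?rsp, ?ra, ?r15, ?r14, ?r13, ?r12, ?rbp, ?rbx, ?same, ?code, ?abi, ?shadow⟩
    case rsp =>
      rw [w_kept .rsp rfl]
      exact hrsp
    case ra => u_frame hra
    case r15 => u_frame h15
    case r14 => u_frame h14
    case r13 => u_frame h13
    case r12 => u_frame h12
    case rbp => u_frame hbp
    case rbx => u_frame hbx
    case same =>
      -- the store is the window `[e.rsp + 16, e.rsp + 20)` of the contract's footprint
      rw [w_mem]
      refine hsame.step_writeLE _ 4 _ (by u_omega) ⟨⟨(e.reg .rsp).toNat + 16, (e.reg .rsp).toNat + 20⟩, ?_, ?_, ?_⟩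
      · simp only [X86.User.Spec.footprint, vspec, deint.wins]
        exact List.mem_cons_of_mem _ (List.mem_append_left _ (List.mem_append_right _
          (List.mem_cons_of_mem _ (List.mem_cons_of_mem _ List.mem_cons_self))))
      · show (e.reg .rsp).toNat + 16 ≤ (e.reg .rsp + 16).toNat
        u_omega
      · show (e.reg .rsp + 16).toNat + 4 ≤ (e.reg .rsp).toNat + 20
        u_omega
    case code => exact w_eq
    case abi => v_inv
    case shadow => exact Mem.EqOn.trans hun hun'
  refine ReachVia.done ⟨w_rip, ⟨hmid', hpre, hreader', hcb', hapart.frame hsf, ?book, ?type2, ?c, ?chSlot, ?outsSlot, ?fSlot,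
    ?cpSlot, ?ppSlot, ?lenSlot, ?table, ?cInt, ?pInt⟩, ⟨?ciReg, ?piSlot, ?effReg, ?tdSlot⟩, hdinv⟩
  case book =>
    exact ⟨hsf.dimensions.trans hbook.dimensions, hsf.entries.trans hbook.entries,
      hsf.codeword_lengths.trans hbook.codeword_lengths, hsf.minimum_value.trans hbook.minimum_value,
      hsf.delta_value.trans hbook.delta_value, hsf.value_bits.trans hbook.value_bits,
      hsf.lookup_type.trans hbook.lookup_type, hsf.sequence_p.trans hbook.sequence_p, hsf.sparse.trans hbook.sparse,
      hsf.lookup_values.trans hbook.lookup_values, hsf.multiplicands.trans hbook.multiplicands,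
      hsf.codewords.trans hbook.codewords, fun k hk => (hsf.fast_huffman k hk).trans (hbook.fast_huffman k hk),
      hsf.sorted_codewords.trans hbook.sorted_codewords, hsf.sorted_values.trans hbook.sorted_values,
      hsf.sorted_entries.trans hbook.sorted_entries⟩
  case type2 =>
    rw [hsf.lookup_type]
    exact htype2
  case c =>
    rw [w_kept .r12 rfl]
    exact hc
  case chSlot => u_frame hchSlot
  case outsSlot => u_frame houtsSlot
  case fSlot => u_frame hfSlot
  case cpSlot => u_frame hcpSlot
  case ppSlot => u_frame hppSlot
  case lenSlot => u_frame hlenSlot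
  case table =>
    intro k hk
    rw [← htable k hk, w_mem]
    unfold chOf at hk
    unfold outsOf
    exact Mem.ptr_writeLE _ _ _ _ _ (by u_omega) (by omega) (by u_omega)
  case cInt =>
    rw [← hcInt, w_mem]
    unfold cpOf
    exact Mem.i32_writeLE _ _ _ _ _ (by u_omega) (by omega) (by u_omega)
  case pInt =>
    rw [← hpInt, w_mem]
    unfold ppOf
    exact Mem.i32_writeLE _ _ _ _ _ (by u_omega) (by omega) (by u_omega)
  case ciReg =>
    rw [w_kept .rbp rfl]
    exact hciReg
  case piSlot => u_frame hpiSlot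
  case effReg =>
    rw [w_kept .r15 rfl]
    exact heffReg
  case tdSlot =>
    -- the stored dword read back: `total_decode − effective`, no wrap (`1 ≤ td`, `effective ≤ 65535`)
    rw [w_mem, Mem.readLE_writeLE_same _ _ _ _ (by decide), ← htdSlot, ht]
    exact Vorbis.Spec.codebook_decode_deinterleave_repeat_5.sub_eff t eff ht32 heff (by rw [← ht, htdSlot]; exact htd)
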